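-- pv_equiv track=rewrite | github.com/samin-al-wasee/problem-solving | even-odd-fibonacci-sum.py | even_odd_fibonacci
-- ===== SOURCE A (Python) =====
-- def even_odd_fibonacci(start_inclusive, end_inclusive):
--     prev_prev = 0
--     prev = 1
--     even_sum = 0
--     odd_sum = 0
--     while prev <= end_inclusive:
--         if prev >= start_inclusive:
--             if prev % 2 == 0:
--                 even_sum += prev
--             else:
--                 odd_sum += prev
--         nextt = prev_prev + prev
--         prev_prev = prev
--         prev = nextt
--     return even_sum, odd_sum
-- ===== SOURCE B (Python) =====
-- def even_odd_fibonacci(start_inclusive, end_inclusive):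
--     fibs = []
--     prev_prev, prev = 0, 1
--     while prev <= end_inclusive:
--         fibs.append(prev)
--         prev_prev, prev = prev, prev_prev + prev
--     even_sum = sum(f for f in fibs if f >= start_inclusive and f % 2 == 0)
--     odd_sum = sum(f for f in fibs if f >= start_inclusive and f % 2 != 0)
--     return even_sum, odd_sum
-- ===== Notes on version B (the rewrite author's own statement) =====
-- stated objective: alternative
-- what changed: B first materializes the list of Fibonacci numbers up to end_inclusive and then computes the even and odd sums as two separate filtered passes over that list, instead of A's single fused loop with in-loop accumulation.
import Mathlib
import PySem

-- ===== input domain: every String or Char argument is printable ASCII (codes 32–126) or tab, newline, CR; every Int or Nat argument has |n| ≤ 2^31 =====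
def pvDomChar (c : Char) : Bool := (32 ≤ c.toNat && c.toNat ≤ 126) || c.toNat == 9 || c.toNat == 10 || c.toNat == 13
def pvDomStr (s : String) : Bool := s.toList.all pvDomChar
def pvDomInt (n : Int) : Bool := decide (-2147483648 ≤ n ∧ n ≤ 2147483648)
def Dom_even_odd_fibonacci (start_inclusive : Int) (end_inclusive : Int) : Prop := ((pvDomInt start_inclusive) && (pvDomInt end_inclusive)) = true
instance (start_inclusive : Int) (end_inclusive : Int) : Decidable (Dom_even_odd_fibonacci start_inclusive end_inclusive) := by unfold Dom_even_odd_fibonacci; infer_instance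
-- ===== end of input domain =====

-- B materializes the Fibonacci list and then takes two filtered sums, instead of A's fused
-- accumulate-while-generating loop; objective: alternative decomposition, same cost.

-- ===== PORT A =====
-- A's while loop, fuel = (end_inclusive + 2).toNat is a totality guard only: the loop
-- exits by its own condition (prev > end_inclusive) before the fuel runs out.
def pvLoopA (start_inclusive end_inclusive : Int) :
    Nat → Int → Int → Int → Int → Int × Int
  | 0, _, _, even_sum, odd_sum => (even_sum, odd_sum)
  | fuel + 1, prev_prev, prev, even_sum, odd_sum =>
    if prev ≤ end_inclusive then
      let even_sum' := if start_inclusive ≤ prev ∧ PySem.Int.mod prev 2 = 0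
                       then even_sum + prev else even_sum
      let odd_sum' := if start_inclusive ≤ prev ∧ ¬ PySem.Int.mod prev 2 = 0
                      then odd_sum + prev else odd_sum
      pvLoopA start_inclusive end_inclusive fuel prev (prev_prev + prev) even_sum' odd_sum'
    else (even_sum, odd_sum)

def even_odd_fibonacci (start_inclusive : Int) (end_inclusive : Int) : Int × Int :=
  pvLoopA start_inclusive end_inclusive (end_inclusive + 2).toNat 0 1 0 0

-- ===== PORT B =====
-- B's generation loop (same totality guard).
def pvGenFibs (end_inclusive : Int) : Nat → Int → Int → List Int
  | 0, _, _ => []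
  | fuel + 1, prev_prev, prev =>
    if prev ≤ end_inclusive then
      prev :: pvGenFibs end_inclusive fuel prev (prev_prev + prev)
    else []

def even_odd_fibonacci_alt (start_inclusive : Int) (end_inclusive : Int) : Int × Int :=
  let fibs := pvGenFibs end_inclusive (end_inclusive + 2).toNat 0 1
  let even_sum := (fibs.filter (fun f =>
    decide (start_inclusive ≤ f) && decide (PySem.Int.mod f 2 = 0))).sum
  let odd_sum := (fibs.filter (fun f =>
    decide (start_inclusive ≤ f) && decide (¬ PySem.Int.mod f 2 = 0))).sum
  (even_sum, odd_sum)

-- ===== PRECONDITION & SPEC =====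
def Spec_even_odd_fibonacci (start_inclusive : Int) (end_inclusive : Int) (out : Int × Int) : Prop := out = even_odd_fibonacci_alt start_inclusive end_inclusive
instance (start_inclusive : Int) (end_inclusive : Int) (out : Int × Int) : Decidable (Spec_even_odd_fibonacci start_inclusive end_inclusive out) := by unfold Spec_even_odd_fibonacci; infer_instance

-- ===== CLAIM (what is proved, stated in full; the proofs are below) =====
def Claim_equal_even_odd_fibonacci : Prop := ∀ (start_inclusive : Int) (end_inclusive : Int), Dom_even_odd_fibonacci start_inclusive end_inclusive → Spec_even_odd_fibonacci start_inclusive end_inclusive (even_odd_fibonacci start_inclusive end_inclusive)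

-- ===== LEMMAS AND PROOFS =====

-- A's fused loop equals B's generate-then-filter-sum, for any fuel and any state.
theorem pvLoopA_eq_gen (s e : Int) :
    ∀ (fuel : Nat) (pp p ev od : Int),
      pvLoopA s e fuel pp p ev od =
        (ev + ((pvGenFibs e fuel pp p).filter (fun f =>
            decide (s ≤ f) && decide (PySem.Int.mod f 2 = 0))).sum,
         od + ((pvGenFibs e fuel pp p).filter (fun f =>
            decide (s ≤ f) && decide (¬ PySem.Int.mod f 2 = 0))).sum) := by
  intro fuel
  induction fuel with
  | zero => intro pp p ev od; simp [pvLoopA, pvGenFibs]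
  | succ n ih =>
    intro pp p ev od
    by_cases hle : p ≤ e
    · simp only [pvLoopA, pvGenFibs, if_pos hle, ih]
      by_cases hs : s ≤ p
      · by_cases hm : (2:Int) ∣ p
        · simp [List.filter, hs, hm]; omega
        · simp [List.filter, hs, hm]; omega
      · simp [List.filter, hs]
    · simp [pvLoopA, pvGenFibs, if_neg hle]

-- ===== VERDICT (by name: the statement is the Claim_ definition above) =====
theorem even_odd_fibonacci_spec : Claim_equal_even_odd_fibonacci := by
  intro s e _
  show _ = _
  simp [even_odd_fibonacci, even_odd_fibonacci_alt, pvLoopA_eq_gen]
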